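-- pv_equiv track=rewrite | github.com/anthonykasza/hdc_experiments | toys/python/block_codes/bsbc/bsbc_utils.py | make_levels
-- ===== SOURCE A (Python) =====
-- import copy
--
-- def make_levels(hv1_c, hv2_c, block_size):
--   '''Make as many incremental levels as possible between two HV
--   '''
--   levels = []
--   levels.append(hv1_c)
--
--   for idx in range(len(hv1_c)):
--
--     while levels[-1][idx] !=  hv2_c[idx]:
--       next_level = copy.deepcopy(levels[-1])
--       middle_of_the_block = block_size // 2
--
--       if hv2_c[idx] > hv1_c[idx]:
--         if hv2_c[idx] - hv1_c[idx] <= middle_of_the_block: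
--           next_level[idx] = (next_level[idx] + 1) % block_size
--         else:
--           next_level[idx] = (next_level[idx] - 1) % block_size
--       else:
--         if hv1_c[idx] - hv2_c[idx] <= middle_of_the_block:
--           next_level[idx] = (next_level[idx] - 1) % block_size
--         else:
--           next_level[idx] = (next_level[idx] + 1) % block_size
--       levels.append(next_level)
--   return levels
-- ===== SOURCE B (Python) =====
-- def make_levels(hv1_c, hv2_c, block_size):
--   '''Make as many incremental levels as possible between two HV
--   '''
--   levels = [hv1_c]
--   for i in range(len(hv1_c)):
--     a, t = hv1_c[i], hv2_c[i]
--     if a == t: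
--       continue
--     half = block_size // 2
--     s = 1 if (t > a) == (abs(t - a) <= half) else -1
--     d = (s * (t - a)) % block_size
--     cnt = block_size if d == 0 else d
--     prefix = list(hv2_c[:i])
--     suffix = list(hv1_c[i + 1:])
--     for j in range(1, cnt + 1):
--       levels.append(prefix + [(a + s * j) % block_size] + suffix)
--   return levels
-- ===== Notes on version B (the rewrite author's own statement) =====
-- stated objective: alternative
-- what changed: B precomputes, per coordinate, the fixed step sign and the exact step count from the two endpoints, then emits each level directly as hv2-prefix + stepped value + hv1-suffix, replacing A's per-step deepcopy of the predecessor vector and per-step re-evaluation of the direction branch.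
-- outside the precondition, e.g. on make_levels([0], [-1], -3): A returns [[0], [-2], [-1]], B returns [[0]]
import Mathlib
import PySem

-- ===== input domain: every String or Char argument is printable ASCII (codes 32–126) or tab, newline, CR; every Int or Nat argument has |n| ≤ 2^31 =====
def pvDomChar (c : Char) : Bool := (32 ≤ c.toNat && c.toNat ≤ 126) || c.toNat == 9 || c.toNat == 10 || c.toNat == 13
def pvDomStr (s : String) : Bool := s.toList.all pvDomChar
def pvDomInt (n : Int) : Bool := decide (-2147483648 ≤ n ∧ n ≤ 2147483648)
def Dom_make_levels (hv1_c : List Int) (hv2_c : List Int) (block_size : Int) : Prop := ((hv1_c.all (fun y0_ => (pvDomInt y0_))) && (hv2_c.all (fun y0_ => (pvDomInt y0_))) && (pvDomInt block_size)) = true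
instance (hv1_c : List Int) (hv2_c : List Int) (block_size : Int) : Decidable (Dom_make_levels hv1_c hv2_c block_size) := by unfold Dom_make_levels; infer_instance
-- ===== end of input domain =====

-- B replaces A's per-step deepcopy chain by a per-coordinate precomputed step sign and step
-- count, emitting each level directly from the two endpoint vectors (objective: alternative decomposition; return value proved equal on Pre_).


-- ===== PORT A =====
-- A's loop body: deepcopy the last level, pick the direction from the two ENDPOINTS, step ±1 mod block_size.
def mlNext (v h1 h2 bs : Int) : Int :=
  let middle := PySem.Int.floordiv bs 2
  if h2 > h1 then
    if h2 - h1 ≤ middle then PySem.Int.mod (v + 1) bs else PySem.Int.mod (v - 1) bs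
  else
    if h1 - h2 ≤ middle then PySem.Int.mod (v - 1) bs else PySem.Int.mod (v + 1) bs

-- A's inner `while` loop at coordinate idx; fuel bounds the iterations (on Pre_ inputs the loop
-- needs at most block_size steps, so the fuel used below is never exhausted).
def mlWhile (fuel : Nat) (cur : List Int) (idx : Nat) (h1 h2 bs : Int) : List (List Int) × List Int :=
  match fuel with
  | 0 => ([], cur)
  | Nat.succ f =>
    if cur.getD idx 0 = h2 then ([], cur)
    else
      let next := cur.set idx (mlNext (cur.getD idx 0) h1 h2 bs)
      let r := mlWhile f next idx h1 h2 bs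
      (next :: r.1, r.2)

def make_levels (hv1_c : List Int) (hv2_c : List Int) (block_size : Int) : List (List Int) :=
  ((List.range hv1_c.length).foldl
    (fun (acc : List (List Int) × List Int) idx =>
      let r := mlWhile (block_size.toNat + 1) acc.2 idx (hv1_c.getD idx 0) (hv2_c.getD idx 0) block_size
      (acc.1 ++ r.1, r.2))
    ([hv1_c], hv1_c)).1

-- ===== PORT B =====
-- Source B's loop body for one coordinate i: precomputed sign, step count, and each level built
-- directly as hv2-prefix ++ stepped value ++ hv1-suffix.
def bPart (hv1_c hv2_c : List Int) (block_size : Int) (i : Nat) : List (List Int) :=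
  let a := hv1_c.getD i 0
  let t := hv2_c.getD i 0
  if a = t then []
  else
    let half := PySem.Int.floordiv block_size 2
    let s : Int := if decide (t > a) = decide (|t - a| ≤ half) then 1 else -1
    let d := PySem.Int.mod (s * (t - a)) block_size
    let cnt : Nat := if d = 0 then block_size.toNat else d.toNat
    let pre := hv2_c.take i
    let suf := hv1_c.drop (i + 1)
    (List.range cnt).map (fun (j : Nat) => pre ++ (PySem.Int.mod (a + s * ((j : Int) + 1)) block_size) :: suf)

def make_levels_alt (hv1_c : List Int) (hv2_c : List Int) (block_size : Int) : List (List Int) :=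
  hv1_c :: (List.range hv1_c.length).flatMap (bPart hv1_c hv2_c block_size)

-- ===== PRECONDITION & SPEC =====
-- Pre_ restricts to the natural domain of the block code: hv2 at least as long as hv1 and, on every
-- coordinate where the endpoints differ, a positive block_size with the target in [0, block_size);
-- outside it A raises (IndexError / ZeroDivisionError), loops forever, or (negative block_size)
-- walks through negative residues a block code never uses.
def Pre_make_levels (hv1_c : List Int) (hv2_c : List Int) (block_size : Int) : Prop :=
  hv1_c.length ≤ hv2_c.length ∧
  ∀ i ∈ List.range hv1_c.length,
    hv1_c.getD i 0 = hv2_c.getD i 0 ∨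
    (0 < block_size ∧ 0 ≤ hv2_c.getD i 0 ∧ hv2_c.getD i 0 < block_size)
instance (hv1_c : List Int) (hv2_c : List Int) (block_size : Int) : Decidable (Pre_make_levels hv1_c hv2_c block_size) := by unfold Pre_make_levels; infer_instance

def pvWitness_make_levels : List Int × List Int × Int := ([0, 3, 7], [2, 3, 1], 4)

def Spec_make_levels (hv1_c : List Int) (hv2_c : List Int) (block_size : Int) (out : List (List Int)) : Prop := out = make_levels_alt hv1_c hv2_c block_size
instance (hv1_c : List Int) (hv2_c : List Int) (block_size : Int) (out : List (List Int)) : Decidable (Spec_make_levels hv1_c hv2_c block_size out) := by unfold Spec_make_levels; infer_instance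

-- ===== CLAIM (what is proved, stated in full; the proofs are below) =====
def Claim_equal_make_levels : Prop := ∀ (hv1_c : List Int) (hv2_c : List Int) (block_size : Int), Dom_make_levels hv1_c hv2_c block_size → Pre_make_levels hv1_c hv2_c block_size → Spec_make_levels hv1_c hv2_c block_size (make_levels hv1_c hv2_c block_size)

-- ===== LEMMAS AND PROOFS =====

def cntF (v t s bs : Int) : Nat :=
  if v = t then 0
  else if PySem.Int.mod (s * (t - v)) bs = 0 then bs.toNat else (PySem.Int.mod (s * (t - v)) bs).toNat

lemma cntF_pos (v t s bs : Int) (hbs : 0 < bs) (hv : v ≠ t) : 1 ≤ cntF v t s bs := by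
  unfold cntF
  rw [if_neg hv]
  split_ifs with h
  · omega
  · have h0 : 0 ≤ PySem.Int.mod (s * (t - v)) bs := PySem.Int.mod_nonneg _ hbs
    omega

lemma cnt_step (bs t s v : Int) (hbs : 0 < bs) (ht0 : 0 ≤ t) (ht1 : t < bs)
    (hs : s = 1 ∨ s = -1) (hv : v ≠ t) :
    cntF (PySem.Int.mod (v + s) bs) t s bs + 1 = cntF v t s bs := by
  have hmod : ∀ a : Int, PySem.Int.mod a bs = a % bs := fun a => PySem.Int.mod_eq_emod_of_pos hbs
  set v1 := PySem.Int.mod (v + s) bs with hv1def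
  have hv1e : v1 = (v + s) % bs := hmod _
  set d := (s * (t - v)) % bs with hd
  have hd0 : 0 ≤ d := Int.emod_nonneg _ (by omega)
  have hdlt : d < bs := Int.emod_lt_of_pos _ hbs
  have hv10 : 0 ≤ v1 := hv1e ▸ Int.emod_nonneg _ (by omega)
  have hv1lt : v1 < bs := hv1e ▸ Int.emod_lt_of_pos _ hbs
  have c1 : Int.ModEq bs v1 (v + s) := by rw [hv1e]; exact Int.emod_emod_of_dvd _ dvd_rfl
  have c2 : Int.ModEq bs (s * (t - v1)) (s * (t - (v + s))) :=
    Int.ModEq.mul_left s ((Int.ModEq.refl t).sub c1)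
  have e : s * (t - (v + s)) = s * (t - v) - 1 := by
    rcases hs with h | h <;> subst h <;> ring
  have c3 : Int.ModEq bs (s * (t - v) - 1) (d - 1) := by
    have : Int.ModEq bs (s * (t - v)) d := (Int.emod_emod_of_dvd _ dvd_rfl).symm
    exact this.sub_right 1
  have hd1 : (s * (t - v1)) % bs = (d - 1) % bs := (c2.trans (e ▸ c3))
  -- now case analysis
  have hsde : PySem.Int.mod (s * (t - v1)) bs = (d - 1) % bs := by rw [hmod]; exact hd1
  have hsd : PySem.Int.mod (s * (t - v)) bs = d := by rw [hmod]
  clear_value v1 d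
  by_cases hdz : d = 0
  · -- cnt v = bs.toNat; d1 = bs - 1
    have hd1v : (d - 1) % bs = bs - 1 := by
      rw [hdz]
      have h := Int.add_mul_emod_self_left (a := (-1:Int)) (b := bs) (c := 1)
      rw [show (0:Int) - 1 = -1 by ring, ← h, Int.emod_eq_of_lt (by omega) (by omega)]
      ring
    have hR : cntF v t s bs = bs.toNat := by
      unfold cntF; rw [if_neg hv, if_pos (by rw [hsd]; exact hdz)]
    by_cases hbs1 : bs = 1
    · have hv1t : v1 = t := by subst hbs1; omega
      have hL : cntF v1 t s bs = 0 := by unfold cntF; rw [if_pos hv1t]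
      rw [hL, hR]; omega
    · have hv1t : v1 ≠ t := by
        intro hvt; rw [hvt, hmod] at hsde; simp at hsde; omega
      have hL : cntF v1 t s bs = (bs - 1).toNat := by
        unfold cntF
        rw [if_neg hv1t, if_neg (by rw [hsde, hd1v]; omega), hsde, hd1v]
      rw [hL, hR]; omega
  · have hd1v : (d - 1) % bs = d - 1 := Int.emod_eq_of_lt (by omega) (by omega)
    have hR : cntF v t s bs = d.toNat := by
      unfold cntF; rw [if_neg hv, if_neg (by rw [hsd]; omega), hsd]
    by_cases hd1z : d = 1
    · have hv1t : v1 = t := by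
        have hz : (s * (t - v1)) % bs = 0 := by rw [hd1, hd1z]; simp
        have hdvd : bs ∣ s * (t - v1) := Int.dvd_of_emod_eq_zero hz
        have hdvd2 : bs ∣ (t - v1) := by
          rcases hs with h | h <;> subst h
          · simpa using hdvd
          · exact (dvd_sub_comm).mp (by simpa using hdvd)
        have := Int.eq_zero_of_abs_lt_dvd hdvd2 (by rw [abs_lt]; omega)
        omega
      have hL : cntF v1 t s bs = 0 := by unfold cntF; rw [if_pos hv1t]
      rw [hL, hR]; omega
    · have hv1t : v1 ≠ t := by
        intro hvt; rw [hvt, hmod] at hsde; simp at hsde; omega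
      have hL : cntF v1 t s bs = (d - 1).toNat := by
        unfold cntF
        rw [if_neg hv1t, if_neg (by rw [hsde, hd1v]; omega), hsde, hd1v]
      rw [hL, hR]; omega

def sgn (h1 h2 bs : Int) : Int :=
  if decide (h2 > h1) = decide (|h2 - h1| ≤ PySem.Int.floordiv bs 2) then 1 else -1

lemma sgn_cases (h1 h2 bs : Int) : sgn h1 h2 bs = 1 ∨ sgn h1 h2 bs = -1 := by
  unfold sgn; split_ifs <;> simp

lemma mlNext_eq (v h1 h2 bs : Int) (hne : h1 ≠ h2) :
    mlNext v h1 h2 bs = PySem.Int.mod (v + sgn h1 h2 bs) bs := by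
  unfold mlNext sgn
  rcases lt_trichotomy h1 h2 with h | h | h
  · have habs : |h2 - h1| = h2 - h1 := abs_of_pos (by omega)
    rw [if_pos h]
    by_cases hle : h2 - h1 ≤ PySem.Int.floordiv bs 2
    · rw [if_pos hle, if_pos (by rw [habs, decide_eq_decide]; exact iff_of_true h hle)]
    · rw [if_neg hle, if_neg (by rw [habs, decide_eq_decide]; exact fun hiff => hle (hiff.mp h)),
          show v - 1 = v + (-1) by ring]
  · exact absurd h hne
  · have habs : |h2 - h1| = h1 - h2 := by rw [abs_of_neg (by omega)]; ring
    rw [if_neg (by omega)]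
    by_cases hle : h1 - h2 ≤ PySem.Int.floordiv bs 2
    · rw [if_pos hle,
          if_neg (by rw [habs, decide_eq_decide]; exact fun hiff => absurd (hiff.mpr hle) (by omega)),
          show v - 1 = v + (-1) by ring]
    · rw [if_neg hle, if_pos (by rw [habs, decide_eq_decide]; exact iff_of_false (by omega) hle)]

lemma cntF_zero (v t s bs : Int) (hbs : 0 < bs) (h : cntF v t s bs = 0) : v = t := by
  by_contra hv
  have := cntF_pos v t s bs hbs hv
  omega

lemma mlWhile_eq (h1 h2 bs : Int) (hbs : 0 < bs) (ht0 : 0 ≤ h2) (ht1 : h2 < bs)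
    (hne : h1 ≠ h2) :
    ∀ (n fuel : Nat) (cur : List Int) (idx : Nat) (v : Int), n ≤ fuel →
      cntF v h2 (sgn h1 h2 bs) bs = n → cur.getD idx 0 = v → idx < cur.length →
      mlWhile fuel cur idx h1 h2 bs =
        ((List.range n).map (fun (j : Nat) => cur.set idx (PySem.Int.mod (v + sgn h1 h2 bs * ((j : Int) + 1)) bs)),
         cur.set idx h2) := by
  intro n
  induction n with
  | zero =>
    intro fuel cur idx v _ hcnt hget hlen
    have hv : v = h2 := cntF_zero _ _ _ _ hbs hcnt
    have hself : cur.set idx h2 = cur := by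
      rw [← hv, ← hget, List.getD_eq_getElem _ _ hlen]
      exact List.set_getElem_self hlen
    cases fuel with
    | zero => simp [mlWhile, hself]
    | succ f => rw [mlWhile, if_pos (by rw [hget, hv])]; simp [hself]
  | succ n ih =>
    intro fuel cur idx v hfuel hcnt hget hlen
    obtain ⟨f, rfl⟩ : ∃ f, fuel = f + 1 := ⟨fuel - 1, by omega⟩
    have hv : v ≠ h2 := by
      intro h; rw [h] at hcnt; unfold cntF at hcnt; simp at hcnt
    set s := sgn h1 h2 bs with hsdef
    have hs := sgn_cases h1 h2 bs
    set v1 := PySem.Int.mod (v + s) bs with hv1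
    have hnext : mlNext v h1 h2 bs = v1 := mlNext_eq v h1 h2 bs hne
    have hlen2 : idx < (cur.set idx v1).length := by simpa using hlen
    have hget2 : (cur.set idx v1).getD idx 0 = v1 := by
      rw [List.getD_eq_getElem _ _ (by simpa using hlen)]
      simp
    have hcnt2 : cntF v1 h2 s bs = n := by
      have := cnt_step bs h2 s v hbs ht0 ht1 hs hv
      rw [← hv1] at this
      omega
    have hrec := ih f (cur.set idx v1) idx v1 (by omega) hcnt2 hget2 hlen2
    rw [mlWhile, if_neg (by rw [hget]; exact hv)]
    simp only [hget, hnext, hrec, Prod.mk.injEq]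
    constructor
    · rw [List.range_succ_eq_map, List.map_cons, List.map_map, List.cons_eq_cons]
      constructor
      · rw [hv1]; congr 1; push_cast; rw [mul_one]
      · apply List.map_congr_left
        intro j _
        simp only [Function.comp]
        rw [List.set_set]
        congr 1
        rw [hv1, PySem.Int.mod_eq_emod_of_pos hbs, PySem.Int.mod_eq_emod_of_pos hbs,
            PySem.Int.mod_eq_emod_of_pos hbs, Int.emod_add_emod]
        congr 1
        push_cast
        ring
    · rw [List.set_set]

-- structure facts about cur = hv2.take k ++ hv1.drop k
lemma cur_len (hv1 hv2 : List Int) (k : Nat) (_hk : k ≤ hv1.length) (hle : hv1.length ≤ hv2.length) :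
    (hv2.take k ++ hv1.drop k).length = hv1.length := by
  simp [List.length_take, List.length_drop]
  omega

lemma cur_getD (hv1 hv2 : List Int) (k : Nat) (hk : k < hv1.length) (hle : hv1.length ≤ hv2.length) :
    (hv2.take k ++ hv1.drop k).getD k 0 = hv1.getD k 0 := by
  have h1 : (hv2.take k).length = k := by simp; omega
  rw [List.getD_append_right _ _ _ _ (by omega), h1, Nat.sub_self,
      List.getD_eq_getElem _ _ (by simp; omega), List.getD_eq_getElem _ _ hk]
  simp

lemma cur_set (hv1 hv2 : List Int) (k : Nat) (x : Int) (hk : k < hv1.length) (hle : hv1.length ≤ hv2.length) :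
    (hv2.take k ++ hv1.drop k).set k x = hv2.take k ++ x :: hv1.drop (k + 1) := by
  have h1 : (hv2.take k).length = k := by simp; omega
  rw [show (hv2.take k ++ hv1.drop k).set k x = (hv2.take k ++ hv1.drop k).set ((hv2.take k).length) x by rw [h1],
      List.set_append_right _ _ (by omega), Nat.sub_self]
  rw [List.drop_eq_getElem_cons hk, List.set_cons_zero]

lemma cur_next (hv1 hv2 : List Int) (k : Nat) (hk : k < hv1.length) (hkle : k < hv2.length) :
    hv2.take k ++ hv2.getD k 0 :: hv1.drop (k + 1) = hv2.take (k + 1) ++ hv1.drop (k + 1) := by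
  rw [List.take_succ_eq_append_getElem hkle, List.getD_eq_getElem _ _ hkle,
      List.append_assoc, List.singleton_append]

lemma outer_inv (hv1 hv2 : List Int) (bs : Int)
    (hle : hv1.length ≤ hv2.length)
    (hpre : ∀ i ∈ List.range hv1.length,
      hv1.getD i 0 = hv2.getD i 0 ∨ (0 < bs ∧ 0 ≤ hv2.getD i 0 ∧ hv2.getD i 0 < bs)) :
    ∀ k ≤ hv1.length,
      ((List.range k).foldl
        (fun (acc : List (List Int) × List Int) idx =>
          let r := mlWhile (bs.toNat + 1) acc.2 idx (hv1.getD idx 0) (hv2.getD idx 0) bs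
          (acc.1 ++ r.1, r.2))
        ([hv1], hv1))
      = (hv1 :: (List.range k).flatMap (bPart hv1 hv2 bs), hv2.take k ++ hv1.drop k) := by
  intro k
  induction k with
  | zero => intro _; simp
  | succ k ih =>
    intro hk1
    have hk : k < hv1.length := by omega
    have hkle : k < hv2.length := by omega
    rw [List.range_succ, List.foldl_append, ih (by omega), List.flatMap_append]
    simp only [List.foldl_cons, List.foldl_nil, List.flatMap_cons, List.flatMap_nil, List.append_nil]
    set cur := hv2.take k ++ hv1.drop k with hcur
    set a := hv1.getD k 0
    set t := hv2.getD k 0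
    have hclen : k < cur.length := by rw [cur_len hv1 hv2 k (by omega) hle]; exact hk
    have hcget : cur.getD k 0 = a := cur_getD hv1 hv2 k hk hle
    by_cases hat : a = t
    · -- while loop exits immediately
      have hwhile : mlWhile (bs.toNat + 1) cur k a t bs = ([], cur) := by
        rw [mlWhile, if_pos (by rw [hcget, hat])]
      rw [hwhile]
      simp only [Prod.mk.injEq]
      constructor
      · rw [bPart, if_pos hat]
        simp
      · rw [hcur, show hv1.drop k = a :: hv1.drop (k+1) from by
              rw [List.drop_eq_getElem_cons hk]
              congr 1
              exact (List.getD_eq_getElem _ _ hk).symm,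
            hat, cur_next hv1 hv2 k hk hkle]
    · have hbs : 0 < bs ∧ 0 ≤ t ∧ t < bs := by
        rcases hpre k (by simp [hk]) with h | h
        · exact absurd h hat
        · exact h
      have hsgneq : sgn a t bs = if decide (t > a) = decide (|t - a| ≤ PySem.Int.floordiv bs 2) then 1 else -1 := rfl
      set s := sgn a t bs with hsdef
      have hcnteq : bPart hv1 hv2 bs k =
          (List.range (cntF a t s bs)).map (fun (j : Nat) => hv2.take k ++ (PySem.Int.mod (a + s * ((j : Int) + 1)) bs) :: hv1.drop (k + 1)) := by
        simp only [bPart, cntF, sgn, hsdef]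
        rw [if_neg hat, if_neg hat]
      have hcntle : cntF a t s bs ≤ bs.toNat + 1 := by
        rw [cntF, if_neg hat]
        split_ifs
        · omega
        · have h1 : PySem.Int.mod (s * (t - a)) bs < bs := PySem.Int.mod_lt _ hbs.1
          omega
      have hwhile := mlWhile_eq a t bs hbs.1 hbs.2.1 hbs.2.2 hat (cntF a t s bs) (bs.toNat + 1)
        cur k a hcntle (by rw [hsdef]) hcget hclen
      rw [hwhile]
      simp only [Prod.mk.injEq]
      constructor
      · rw [hcnteq, List.cons_append]
        congr 1
        congr 1
        apply List.map_congr_left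
        intro j _
        rw [hcur, cur_set hv1 hv2 k _ hk hle, hsdef]
      · rw [hcur, cur_set hv1 hv2 k t hk hle, cur_next hv1 hv2 k hk hkle]

lemma main_eq (hv1 hv2 : List Int) (bs : Int)
    (hle : hv1.length ≤ hv2.length)
    (hpre : ∀ i ∈ List.range hv1.length,
      hv1.getD i 0 = hv2.getD i 0 ∨ (0 < bs ∧ 0 ≤ hv2.getD i 0 ∧ hv2.getD i 0 < bs)) :
    make_levels hv1 hv2 bs = make_levels_alt hv1 hv2 bs := by
  rw [make_levels, make_levels_alt, outer_inv hv1 hv2 bs hle hpre hv1.length (le_refl _)]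

-- ===== VERDICT (by name: the statement is the Claim_ definition above) =====
theorem make_levels_spec : Claim_equal_make_levels := by
  intro hv1_c hv2_c block_size _ hpre
  unfold Spec_make_levels
  exact main_eq hv1_c hv2_c block_size hpre.1 hpre.2
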